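-- pv_equiv track=rewrite | github.com/VictorAut/liken | tests/integration/test_matrix.py | strings_same_len
-- ===== SOURCE A (Python) =====
-- import typing
--
-- def strings_same_len(array: typing.Iterable, min_len: int = 3):
--     n = len(array)
--     for i in range(n):
--         for j in range(i + 1, n):
--             if (
--                 len(array[i]) >= min_len
--                 and len(array[j]) >= min_len
--                 #
--                 and len(array[i]) == len(array[j])
--             ):
--                 yield i, j
-- ===== SOURCE B (Python) =====
-- import typing
--
-- def strings_same_len(array: typing.Iterable, min_len: int = 3):
--     # Group eligible indices by string length once, then emit partners from the
--     # index's own bucket instead of scanning the whole array for every i.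
--     eligible = [(len(s), i) for i, s in enumerate(array) if len(s) >= min_len]
--     buckets = {}
--     for length, i in eligible:
--         buckets.setdefault(length, []).append(i)
--     for length, i in eligible:
--         for j in buckets[length]:
--             if j > i:
--                 yield i, j
-- ===== Notes on version B (the rewrite author's own statement) =====
-- stated objective: faster
-- what changed: Replaced A's all-pairs double loop over range(n) with a single pass that groups eligible indices by string length in a dict, then emits each index's partners from its own length bucket only.
import Mathlib
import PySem

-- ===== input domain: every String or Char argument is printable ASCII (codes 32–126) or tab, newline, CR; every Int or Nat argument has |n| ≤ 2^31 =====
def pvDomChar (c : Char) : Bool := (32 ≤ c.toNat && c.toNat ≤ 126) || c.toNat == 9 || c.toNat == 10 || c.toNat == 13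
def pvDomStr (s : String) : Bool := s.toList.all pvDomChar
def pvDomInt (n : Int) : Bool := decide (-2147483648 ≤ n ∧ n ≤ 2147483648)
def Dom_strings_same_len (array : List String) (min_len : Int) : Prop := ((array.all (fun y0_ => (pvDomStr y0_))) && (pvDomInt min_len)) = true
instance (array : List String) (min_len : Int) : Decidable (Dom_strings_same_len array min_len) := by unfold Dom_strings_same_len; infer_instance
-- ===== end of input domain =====

-- B groups the eligible indices by string length in a dict built once and pairs each index with
-- the later members of its own bucket, replacing A's all-pairs double loop (objective: faster).
-- Both A and B are Python generators; the equivalence is about the list of yielded pairs.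

-- ===== PORT A =====
-- len(array[i]) for an index produced by range(len(array)): always in range, so pyGetD is exact.
def pvLenAt (array : List String) (i : Int) : Int :=
  PySem.Str.len (PySem.List.pyGetD array i "")

def strings_same_len (array : List String) (min_len : Int) : List (Int × Int) :=
  let n : Int := array.length
  (PySem.List.pyRange 0 n 1).foldl (fun acc i =>
    (PySem.List.pyRange (i + 1) n 1).foldl (fun acc2 j =>
      if min_len ≤ pvLenAt array i ∧ min_len ≤ pvLenAt array j ∧
          pvLenAt array i = pvLenAt array j then
        acc2 ++ [(i, j)]
      else acc2) acc) []

-- ===== PORT B =====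
def strings_same_len_alt (array : List String) (min_len : Int) : List (Int × Int) :=
  let eligible : List (Int × Int) :=
    (PySem.List.enumerate array 0).foldl (fun acc p =>
      if min_len ≤ PySem.Str.len p.2 then acc ++ [(PySem.Str.len p.2, p.1)] else acc) []
  let buckets : PySem.Dict Int (List Int) :=
    eligible.foldl (fun d q => d.modify q.1 [] (fun b => b ++ [q.2])) PySem.Dict.empty
  eligible.foldl (fun acc q =>
    (buckets.getD q.1 []).foldl (fun acc2 j =>
      if q.2 < j then acc2 ++ [(q.2, j)] else acc2) acc) []

-- ===== PRECONDITION & SPEC =====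
def Spec_strings_same_len (array : List String) (min_len : Int) (out : List (Int × Int)) : Prop := out = strings_same_len_alt array min_len
instance (array : List String) (min_len : Int) (out : List (Int × Int)) : Decidable (Spec_strings_same_len array min_len out) := by unfold Spec_strings_same_len; infer_instance

-- ===== CLAIM (what is proved, stated in full; the proofs are below) =====
def Claim_equal_strings_same_len : Prop := ∀ (array : List String) (min_len : Int), Dom_strings_same_len array min_len → Spec_strings_same_len array min_len (strings_same_len array min_len)

-- ===== LEMMAS AND PROOFS =====

-- flatMap over a filtered list: keep the full list, emit [] where the test fails
theorem pv_flatMap_filter {α β : Type} (l : List α) (p : α → Bool) (g : α → List β) :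
    (l.filter p).flatMap g = l.flatMap (fun a => if p a then g a else []) := by
  induction l with
  | nil => rfl
  | cons x t ih =>
    by_cases h : p x <;> simp [h, List.flatMap_cons, ih]

-- filtering range(0, n) to the elements above i gives range(i+1, n)
theorem pv_filter_range_lt (n i : Int) (h0 : 0 ≤ i) :
    (PySem.List.pyRange 0 n 1).filter (fun j => decide (i < j)) = PySem.List.pyRange (i+1) n 1 := by
  by_cases hn : i + 1 ≤ n
  · rw [PySem.List.pyRange_one_append 0 (i+1) n (by omega) hn, List.filter_append]
    have h1 : (PySem.List.pyRange 0 (i+1) 1).filter (fun j => decide (i < j)) = [] := by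
      rw [List.filter_eq_nil_iff]
      intro a ha
      rw [PySem.List.mem_pyRange_one] at ha
      simp; omega
    have h2 : (PySem.List.pyRange (i+1) n 1).filter (fun j => decide (i < j)) = PySem.List.pyRange (i+1) n 1 := by
      rw [List.filter_eq_self]
      intro a ha
      rw [PySem.List.mem_pyRange_one] at ha
      simp; omega
    rw [h1, h2, List.nil_append]
  · have hr : PySem.List.pyRange (i+1) n 1 = ([] : List Int) :=
      PySem.List.pyRange_one_eq_nil (by omega)
    rw [hr, List.filter_eq_nil_iff]
    intro a ha
    rw [PySem.List.mem_pyRange_one] at ha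
    simp; omega

-- A's double loop in flatMap normal form
theorem pvA_eq (array : List String) (m : Int) :
    strings_same_len array m =
    (PySem.List.pyRange 0 (array.length : Int) 1).flatMap (fun i =>
      ((PySem.List.pyRange (i + 1) (array.length : Int) 1).filter (fun j =>
        decide (m ≤ pvLenAt array i ∧ m ≤ pvLenAt array j ∧ pvLenAt array i = pvLenAt array j))).map
        (fun j => (i, j))) := by
  unfold strings_same_len
  simp only [PySem.List.foldl_append_ite, PySem.List.foldl_append_eq_flatMap, List.nil_append]

-- B's bucket loops in flatMap normal form
theorem pvB_eq (array : List String) (m : Int) :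
    strings_same_len_alt array m =
    ((PySem.List.pyRange 0 (array.length : Int) 1).filter (fun k => decide (m ≤ pvLenAt array k))).flatMap
      (fun i =>
        ((((PySem.List.pyRange 0 (array.length : Int) 1).filter
              (fun k => decide (m ≤ pvLenAt array k))).filter
            (fun j => pvLenAt array j == pvLenAt array i)).filter
          (fun j => decide (i < j))).map (fun j => (i, j))) := by
  unfold strings_same_len_alt
  simp only []
  have helig : (PySem.List.enumerate array 0).foldl (fun acc p =>
      if m ≤ PySem.Str.len p.2 then acc ++ [(PySem.Str.len p.2, p.1)] else acc) ([] : List (Int × Int)) =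
      ((PySem.List.pyRange 0 (array.length : Int) 1).filter (fun k => decide (m ≤ pvLenAt array k))).map
        (fun k => (pvLenAt array k, k)) := by
    rw [PySem.List.foldl_append_ite, List.nil_append,
        PySem.List.enumerate_eq_map_pyRange (d := ""), List.filter_map, List.map_map]
    simp only [PySem.Str.len_eq]
    rfl
  rw [helig]
  set R := PySem.List.pyRange 0 (array.length : Int) 1 with hR
  set pm : Int → Bool := fun k => decide (m ≤ pvLenAt array k) with hpm
  set E : List (Int × Int) := (R.filter pm).map (fun k => (pvLenAt array k, k)) with hE
  have hbucket : ∀ L : Int,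
      (E.foldl (fun d q => d.modify q.1 [] (fun b => b ++ [q.2])) PySem.Dict.empty).getD L [] =
      ((R.filter pm).filter (fun j => pvLenAt array j == L)).map (fun k => k) := by
    intro L
    rw [PySem.Dict.getD_foldl_modify_append, PySem.Dict.getD_empty, List.nil_append, hE,
        List.filter_map, List.map_map]
    rfl
  simp only [hbucket, List.map_id_fun', id_eq]
  simp only [PySem.List.foldl_append_ite, PySem.List.foldl_append_eq_flatMap, List.nil_append]
  rw [hE, List.flatMap_map]

-- the two normal forms agree pointwise over range(0, n)
theorem pv_glue (array : List String) (m : Int) :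
    (PySem.List.pyRange 0 (array.length : Int) 1).flatMap (fun i =>
      ((PySem.List.pyRange (i + 1) (array.length : Int) 1).filter (fun j =>
        decide (m ≤ pvLenAt array i ∧ m ≤ pvLenAt array j ∧ pvLenAt array i = pvLenAt array j))).map
        (fun j => (i, j))) =
    (PySem.List.pyRange 0 (array.length : Int) 1).flatMap (fun i =>
      if decide (m ≤ pvLenAt array i) then
        ((((PySem.List.pyRange 0 (array.length : Int) 1).filter
              (fun k => decide (m ≤ pvLenAt array k))).filter
            (fun j => pvLenAt array j == pvLenAt array i)).filter
          (fun j => decide (i < j))).map (fun j => (i, j))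
      else []) := by
  set R := PySem.List.pyRange 0 (array.length : Int) 1 with hR
  rw [List.flatMap_def, List.flatMap_def]
  apply congrArg
  apply List.map_congr_left
  intro i hi
  have hiR : 0 ≤ i ∧ i < (array.length : Int) := by
    rw [hR, PySem.List.mem_pyRange_one] at hi; exact hi
  by_cases h : m ≤ pvLenAt array i
  · simp only [h, decide_true, if_true]
    apply congrArg
    rw [← pv_filter_range_lt (array.length : Int) i hiR.1, List.filter_filter,
        List.filter_filter, List.filter_filter]
    apply List.filter_congr
    intro a _
    by_cases h2 : pvLenAt array i = pvLenAt array a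
    · by_cases h1 : m ≤ pvLenAt array a <;> by_cases h3 : i < a <;> simp [h1, h2, h3]
    · have h2' : pvLenAt array a ≠ pvLenAt array i := fun e => h2 e.symm
      simp [h2, h2']
  · simp [h]

-- ===== VERDICT (by name: the statement is the Claim_ definition above) =====
theorem strings_same_len_spec : Claim_equal_strings_same_len := by
  intro array min_len _
  unfold Spec_strings_same_len
  rw [pvA_eq, pvB_eq, pv_flatMap_filter]
  exact pv_glue array min_len
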